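-- pv_equiv track=rewrite | github.com/madhurtyagii/NeuroVault | src/chat_ui.py | _is_casual_message
-- ===== SOURCE A (Python) =====
-- def _is_casual_message(query):
--     """Check if message is casual/greeting that doesn't need document search"""
--     casual_patterns = [
--         # Greetings
--         'hi', 'hello', 'hey', 'hii', 'hiii', 'hiiii', 'howdy', 'sup', 'yo', 'hola',
--         'good morning', 'good afternoon', 'good evening', 'good night', 'morning', 'evening',
--         'gm', 'gn',  # Short forms
--
--         # How are you variations
--         'how are you', "how's it going", 'whats up', "what's up", 'wassup', 'wazzup',
--         'how r u', 'hru', 'how do you do', "how's everything", 'how have you been',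
--
--         # Thank you / Bye
--         'thanks', 'thank you', 'thx', 'ty', 'thank u', 'thanks a lot', 'thanks bro',
--         'bye', 'goodbye', 'see you', 'see ya', 'cya', 'later', 'take care', 'gtg',
--
--         # About the assistant
--         'who are you', 'what are you', 'what can you do', 'tell me about yourself',
--         'what is neurovault', 'what is your name', 'your name', 'who made you',
--
--         # Affirmations and reactions
--         'help', 'test', 'ok', 'okay', 'okie', 'k', 'cool', 'nice', 'great', 'awesome',
--         'wow', 'amazing', 'good', 'perfect', 'excellent', 'lol', 'haha', 'lmao',
--         'yes', 'no', 'yep', 'nope', 'yeah', 'nah', 'sure', 'yea', 'ya',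
--
--         # Small talk
--         'bro', 'dude', 'man', 'bruh', 'bhai', "what's new", 'nothing much'
--     ]
--     query_lower = query.lower().strip()
--
--     # Remove punctuation for matching
--     query_clean = query_lower.rstrip('!?.,')
--
--     # Check for exact matches or starts with
--     for pattern in casual_patterns:
--         if query_clean == pattern or query_clean.startswith(pattern + ' ') or query_clean.startswith(pattern + ','):
--             return True
--
--     # Very short queries (1-3 words, under 20 chars) are likely casual
--     word_count = len(query_clean.split())
--     if word_count <= 3 and len(query_clean) < 20:
--         # But not if they contain question words that suggest knowledge queries
--         knowledge_indicators = ['what is', 'how to', 'explain', 'tell me about', 'describe',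
--                                'list', 'show me', 'my skills', 'my experience', 'my projects']
--         for indicator in knowledge_indicators:
--             if indicator in query_lower:
--                 return False
--         return True
--
--     return False
-- ===== SOURCE B (Python) =====
-- # Patterns stored as one '|'-joined string; a ternary search trie is built once
-- # at import, and the query is classified by a single walk over its characters
-- # instead of a per-pattern equality/startswith scan.
-- _PATTERN_DATA = (
--     "hi|hello|hey|hii|hiii|hiiii|howdy|sup|yo|hola|"
--     "good morning|good afternoon|good evening|good night|morning|evening|"
--     "gm|gn|"
--     "how are you|how's it going|whats up|what's up|wassup|wazzup|"
--     "how r u|hru|how do you do|how's everything|how have you been|"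
--     "thanks|thank you|thx|ty|thank u|thanks a lot|thanks bro|"
--     "bye|goodbye|see you|see ya|cya|later|take care|gtg|"
--     "who are you|what are you|what can you do|tell me about yourself|"
--     "what is neurovault|what is your name|your name|who made you|"
--     "help|test|ok|okay|okie|k|cool|nice|great|awesome|"
--     "wow|amazing|good|perfect|excellent|lol|haha|lmao|"
--     "yes|no|yep|nope|yeah|nah|sure|yea|ya|"
--     "bro|dude|man|bruh|bhai|what's new|nothing much"
-- )
-- _KNOWLEDGE_DATA = ("what is|how to|explain|tell me about|describe|"
--                    "list|show me|my skills|my experience|my projects")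
-- _KNOWLEDGE_INDICATORS = _KNOWLEDGE_DATA.split('|')
--
--
-- def _tst_chain(p, i):
--     """A fresh trie chain spelling out p[i:] (p[i:] non-empty)."""
--     eq = _tst_chain(p, i + 1) if i + 1 < len(p) else None
--     return [p[i], i + 1 == len(p), None, eq, None]
--
--
-- def _tst_insert(node, p, i):
--     """Insert p[i:] (non-empty) into the ternary search trie node."""
--     if node is None:
--         return _tst_chain(p, i)
--     c, _term, _lt, _eq, _gt = node
--     ch = p[i]
--     if ch < c:
--         node[2] = _tst_insert(node[2], p, i)
--     elif c < ch:
--         node[4] = _tst_insert(node[4], p, i)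
--     elif i + 1 == len(p):
--         node[1] = True
--     else:
--         node[3] = _tst_insert(node[3], p, i + 1)
--     return node
--
--
-- _TST = None
-- for _p in _PATTERN_DATA.split('|'):
--     _TST = _tst_insert(_TST, _p, 0)
--
--
-- def _tst_walk(node, s, i):
--     """True iff some trie word equals s[i:j] where j is len(s) or s[j] in ' ,'."""
--     if node is None or i == len(s):
--         return False
--     c, term, lt, eq, gt = node
--     ch = s[i]
--     if ch < c:
--         return _tst_walk(lt, s, i)
--     if c < ch:
--         return _tst_walk(gt, s, i)
--     if term and (i + 1 == len(s) or s[i + 1] in ' ,'):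
--         return True
--     return _tst_walk(eq, s, i + 1)
--
--
-- def _is_casual_message(query):
--     """Check if message is casual/greeting that doesn't need document search"""
--     query_lower = query.lower().strip()
--     query_clean = query_lower
--     while query_clean and query_clean[-1] in '!?.,':
--         query_clean = query_clean[:-1]
--     if _tst_walk(_TST, query_clean, 0):
--         return True
--     # Very short queries (1-3 words, under 20 chars) are likely casual,
--     # unless they contain a knowledge-query indicator.
--     if len(query_clean.split()) <= 3 and len(query_clean) < 20:
--         return not any(ind in query_lower for ind in _KNOWLEDGE_INDICATORS)
--     return False
-- ===== Notes on version B (the rewrite author's own statement) =====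
-- stated objective: alternative
-- what changed: Phase 1 no longer loops over the ~90 patterns testing equality/startswith: B builds a ternary search trie from the patterns once at import and classifies the query with a single character-by-character trie walk (accept at a terminal node followed by end/space/comma); the punctuation rstrip is an explicit pop-last loop and phase 2 is the same heuristic expressed with any().
import Mathlib
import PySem

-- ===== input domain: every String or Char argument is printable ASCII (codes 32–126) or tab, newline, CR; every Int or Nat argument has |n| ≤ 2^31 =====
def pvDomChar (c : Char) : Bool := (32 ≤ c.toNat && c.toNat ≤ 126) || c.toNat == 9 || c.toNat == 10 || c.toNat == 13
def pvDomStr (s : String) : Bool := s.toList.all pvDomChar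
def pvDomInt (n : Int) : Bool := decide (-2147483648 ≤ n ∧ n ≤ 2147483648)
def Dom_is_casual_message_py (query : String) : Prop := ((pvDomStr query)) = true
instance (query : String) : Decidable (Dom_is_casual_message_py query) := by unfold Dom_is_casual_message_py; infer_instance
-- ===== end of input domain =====

-- B replaces A's per-pattern equality/startswith loop by a single walk of a
-- ternary search trie built once from the pattern data (objective: alternative).

-- ===== PORT A =====
-- the literal pattern list from A
def pvCasualPatterns : List (List Char) :=
  (["hi", "hello", "hey", "hii", "hiii", "hiiii", "howdy", "sup", "yo", "hola",
    "good morning", "good afternoon", "good evening", "good night", "morning", "evening",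
    "gm", "gn",
    "how are you", "how's it going", "whats up", "what's up", "wassup", "wazzup",
    "how r u", "hru", "how do you do", "how's everything", "how have you been",
    "thanks", "thank you", "thx", "ty", "thank u", "thanks a lot", "thanks bro",
    "bye", "goodbye", "see you", "see ya", "cya", "later", "take care", "gtg",
    "who are you", "what are you", "what can you do", "tell me about yourself",
    "what is neurovault", "what is your name", "your name", "who made you",
    "help", "test", "ok", "okay", "okie", "k", "cool", "nice", "great", "awesome",
    "wow", "amazing", "good", "perfect", "excellent", "lol", "haha", "lmao",
    "yes", "no", "yep", "nope", "yeah", "nah", "sure", "yea", "ya",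
    "bro", "dude", "man", "bruh", "bhai", "what's new", "nothing much"] : List String).map String.toList

-- the knowledge-indicator list from A
def pvKnowledgeIndicators : List (List Char) :=
  (["what is", "how to", "explain", "tell me about", "describe",
    "list", "show me", "my skills", "my experience", "my projects"] : List String).map String.toList

-- exact port of str.rstrip(chars) on the ASCII domain: drop trailing chars from the given set
def pvRstrip (cs : List Char) (chars : List Char) : List Char :=
  (cs.reverse.dropWhile (fun c => chars.contains c)).reverse

def is_casual_message_py (query : String) : Bool :=
  let ql := PySem.Chars.strip (PySem.Chars.lower query.toList)
  let qc := pvRstrip ql ['!', '?', '.', ',']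
  if pvCasualPatterns.any (fun p =>
      qc == p || PySem.Chars.startswith qc (p ++ [' ']) || PySem.Chars.startswith qc (p ++ [','])) then
    true
  else
    let word_count := (PySem.Chars.split₀ qc).length
    if word_count ≤ 3 ∧ qc.length < 20 then
      if pvKnowledgeIndicators.any (fun ind => PySem.Chars.isIn ind ql) then false
      else true
    else false

-- ===== PORT B =====
-- B's pattern data: one '|'-joined string, split at import time
def pvPatternData : String :=
  "hi|hello|hey|hii|hiii|hiiii|howdy|sup|yo|hola|good morning|good afternoon|good evening|good night|morning|evening|gm|gn|how are you|how's it going|whats up|what's up|wassup|wazzup|how r u|hru|how do you do|how's everything|how have you been|thanks|thank you|thx|ty|thank u|thanks a lot|thanks bro|bye|goodbye|see you|see ya|cya|later|take care|gtg|who are you|what are you|what can you do|tell me about yourself|what is neurovault|what is your name|your name|who made you|help|test|ok|okay|okie|k|cool|nice|great|awesome|wow|amazing|good|perfect|excellent|lol|haha|lmao|yes|no|yep|nope|yeah|nah|sure|yea|ya|bro|dude|man|bruh|bhai|what's new|nothing much"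

def pvKnowledgeData : String :=
  "what is|how to|explain|tell me about|describe|list|show me|my skills|my experience|my projects"

def pvPatternsB : List (List Char) := PySem.Chars.splitOn pvPatternData.toList ['|']
def pvIndicatorsB : List (List Char) := PySem.Chars.splitOn pvKnowledgeData.toList ['|']

-- a ternary search trie of words
inductive PvTST where
  | nil : PvTST
  | node : Char → Bool → PvTST → PvTST → PvTST → PvTST

-- a fresh chain spelling out a (non-empty) word
def pvChain : List Char → PvTST
  | [] => .nil
  | x :: rest => .node x rest.isEmpty .nil (pvChain rest) .nil

-- insert a (non-empty) word
def pvInsert : PvTST → List Char → PvTST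
  | t, [] => t
  | .nil, x :: rest => pvChain (x :: rest)
  | .node c term lt eq gt, x :: rest =>
    if x < c then .node c term (pvInsert lt (x :: rest)) eq gt
    else if c < x then .node c term lt eq (pvInsert gt (x :: rest))
    else if rest.isEmpty then .node c true lt eq gt
    else .node c term lt (pvInsert eq rest) gt

def pvTrie : PvTST := pvPatternsB.foldl pvInsert .nil

-- true iff some trie word equals a prefix of cs cut at the end or before ' '/','
def pvWalk : PvTST → List Char → Bool
  | .nil, _ => false
  | .node _ _ _ _ _, [] => false
  | .node c term lt eq gt, x :: rest =>
    if x < c then pvWalk lt (x :: rest)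
    else if c < x then pvWalk gt (x :: rest)
    else (term && (rest.isEmpty || (rest.head? == some ' ' || rest.head? == some ','))) ||
      pvWalk eq rest

-- port of B's pop-last-punctuation loop
def pvChopPunct : List Char → List Char
  | [] => []
  | x :: rest =>
    if (x :: rest).getLast (by simp) = '!' ∨ (x :: rest).getLast (by simp) = '?' ∨
       (x :: rest).getLast (by simp) = '.' ∨ (x :: rest).getLast (by simp) = ','
    then pvChopPunct (x :: rest).dropLast else x :: rest
termination_by cs => cs.length
decreasing_by simp

def is_casual_message_py_alt (query : String) : Bool :=
  let ql := PySem.Chars.strip (PySem.Chars.lower query.toList)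
  let qc := pvChopPunct ql
  if pvWalk pvTrie qc then true
  else if (PySem.Chars.split₀ qc).length ≤ 3 ∧ qc.length < 20 then
    !(pvIndicatorsB.any (fun ind => PySem.Chars.isIn ind ql))
  else false

-- ===== PRECONDITION & SPEC =====
def Spec_is_casual_message_py (query : String) (out : Bool) : Prop := out = is_casual_message_py_alt query
instance (query : String) (out : Bool) : Decidable (Spec_is_casual_message_py query out) := by unfold Spec_is_casual_message_py; infer_instance

-- ===== CLAIM (what is proved, stated in full; the proofs are below) =====
def Claim_equal_is_casual_message_py : Prop := ∀ (query : String), Dom_is_casual_message_py query → Spec_is_casual_message_py query (is_casual_message_py query)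

-- ===== LEMMAS AND PROOFS =====

-- trie membership (proof-side characterisation of pvInsert/pvWalk)
def pvMember : PvTST → List Char → Bool
  | .nil, _ => false
  | .node _ _ _ _ _, [] => false
  | .node c term lt eq gt, x :: rest =>
    if x < c then pvMember lt (x :: rest)
    else if c < x then pvMember gt (x :: rest)
    else if rest.isEmpty then term else pvMember eq rest

lemma pvBneCons {y x : Char} (h : y ≠ x) (qr rest : List Char) :
    (y :: qr == x :: rest) = false := by
  simp [List.cons_beq_cons, beq_eq_false_iff_ne, h]

lemma pvMember_chain (p : List Char) (hp : p ≠ []) (q : List Char) :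
    pvMember (pvChain p) q = (q == p) := by
  induction p generalizing q with
  | nil => exact absurd rfl hp
  | cons x rest ih =>
    cases q with
    | nil => simp [pvChain, pvMember]
    | cons y qr =>
      simp only [pvChain, pvMember]
      rcases lt_trichotomy y x with h | h | h
      · simp [h, List.cons_beq_cons, (by simp [h.ne] : (y == x) = false)]
      · subst h
        simp only [lt_irrefl, if_false]
        cases qr with
        | nil => cases rest <;> simp
        | cons z qr' =>
          cases rest with
          | nil => simp [pvChain, pvMember]
          | cons w r' => rw [ih (by simp)]; simp [List.cons_beq_cons]
      · simp [h, lt_asymm h, (by simp [h.ne'] : (y == x) = false)]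

lemma pvMember_insert (t : PvTST) (p : List Char) (hp : p ≠ []) (q : List Char) :
    pvMember (pvInsert t p) q = (q == p || pvMember t q) := by
  induction t generalizing p q with
  | nil =>
    cases p with
    | nil => exact absurd rfl hp
    | cons x rest => simp [pvInsert, pvMember_chain _ hp, pvMember]
  | node c term lt eq gt ihlt iheq ihgt =>
    cases p with
    | nil => exact absurd rfl hp
    | cons x rest =>
      simp only [pvInsert]
      rcases lt_trichotomy x c with h | h | h
      · rw [if_pos h]
        cases q with
        | nil => simp [pvMember]
        | cons y qr =>
          simp only [pvMember]
          rcases lt_trichotomy y c with h' | h' | h'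
          · simp only [if_pos h', ihlt _ hp]
          · subst h'
            simp [pvMember, pvBneCons h.ne' qr rest]
          · simp [pvMember, lt_asymm h', h', pvBneCons (lt_trans h h').ne' qr rest]
      · subst h
        rw [if_neg (lt_irrefl x)]
        by_cases hr : rest.isEmpty
        · rw [if_pos hr]
          cases q with
          | nil => simp [pvMember]
          | cons y qr =>
            simp only [pvMember]
            rcases lt_trichotomy y x with h' | h' | h'
            · simp [pvMember, h', pvBneCons h'.ne qr rest]
            · subst h'
              cases qr with
              | nil => simp_all [pvMember, List.isEmpty_iff]
              | cons z qr' => simp_all [pvMember, List.isEmpty_iff, List.cons_beq_cons]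
            · simp [pvMember, h', lt_asymm h', pvBneCons h'.ne' qr rest]
        · rw [if_neg hr]
          cases q with
          | nil => simp [pvMember]
          | cons y qr =>
            simp only [pvMember]
            rcases lt_trichotomy y x with h' | h' | h'
            · simp [pvMember, h', pvBneCons h'.ne qr rest]
            · subst h'
              cases qr with
              | nil => simp_all [pvMember, List.isEmpty_iff, List.cons_beq_cons]
              | cons z qr' =>
                have hre : rest ≠ [] := by simpa [List.isEmpty_iff] using hr
                simp only [pvMember, lt_irrefl, if_false, List.isEmpty_cons,
                  iheq _ hre, List.cons_beq_cons, beq_self_eq_true, Bool.true_and]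
                simp
            · simp [pvMember, h', lt_asymm h', pvBneCons h'.ne' qr rest]
      · rw [if_neg (lt_asymm h), if_pos h]
        cases q with
        | nil => simp [pvMember]
        | cons y qr =>
          simp only [pvMember]
          rcases lt_trichotomy y c with h' | h' | h'
          · simp [pvMember, h', pvBneCons (lt_trans h' h).ne qr rest]
          · subst h'
            simp [pvMember, pvBneCons h.ne qr rest]
          · simp only [if_neg (lt_asymm h'), if_pos h', ihgt _ hp]

lemma pvMember_foldl (l : List (List Char)) (hl : ∀ p ∈ l, p ≠ []) (t : PvTST) (q : List Char) :
    pvMember (l.foldl pvInsert t) q = (l.contains q || pvMember t q) := by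
  induction l generalizing t with
  | nil => simp
  | cons p l ih =>
    simp only [List.foldl_cons, List.contains_cons]
    rw [ih (fun p hp => hl p (List.mem_cons_of_mem _ hp)),
      pvMember_insert t p (hl p (List.mem_cons_self)) q]
    cases q == p <;> cases l.contains q <;> simp

set_option maxRecDepth 100000 in
set_option maxHeartbeats 1000000 in
lemma pvPatternsB_eq : pvPatternsB = pvCasualPatterns := by decide

set_option maxRecDepth 100000 in
lemma pvPatternsB_ne_nil : ∀ p ∈ pvPatternsB, p ≠ [] := by
  rw [pvPatternsB_eq]; decide

set_option maxRecDepth 100000 in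
set_option maxHeartbeats 1000000 in
lemma pvIndicatorsB_eq : pvIndicatorsB = pvKnowledgeIndicators := by decide

lemma pvChopPunct_eq (cs : List Char) :
    pvChopPunct cs = pvRstrip cs ['!', '?', '.', ','] := by
  induction cs using List.reverseRecOn with
  | nil => simp [pvChopPunct, pvRstrip]
  | append_singleton xs x ih =>
    cases hxx : xs ++ [x] with
    | nil => simp at hxx
    | cons a b =>
      have hg : (a :: b).getLast (by simp) = x := by
        have h1 : (a :: b).getLast? = some x := by rw [← hxx, List.getLast?_concat]
        have h2 : (a :: b).getLast? = some ((a :: b).getLast (by simp)) :=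
          List.getLast?_eq_getLast (by simp)
        rw [h2] at h1
        exact Option.some_inj.mp h1
      have hd : (a :: b).dropLast = xs := by rw [← hxx, List.dropLast_concat]
      calc pvChopPunct (a :: b)
          = if x = '!' ∨ x = '?' ∨ x = '.' ∨ x = ','
            then pvChopPunct xs else a :: b := by
              rw [pvChopPunct]; simp only [hg, hd]
        _ = pvRstrip (xs ++ [x]) ['!', '?', '.', ','] := by
              by_cases hx : x = '!' ∨ x = '?' ∨ x = '.' ∨ x = ','
              · rw [if_pos hx, ih, pvRstrip, pvRstrip, List.reverse_append,
                  List.reverse_singleton, List.singleton_append, List.dropWhile_cons, if_pos]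
                rcases hx with h|h|h|h <;> simp [h]
              · rw [if_neg hx, pvRstrip, List.reverse_append, List.reverse_singleton,
                  List.singleton_append, List.dropWhile_cons, if_neg, List.reverse_cons,
                  List.reverse_reverse, hxx]
                simp only [List.contains_eq_mem, List.mem_cons]
                simpa using hx
        _ = pvRstrip (a :: b) ['!', '?', '.', ','] := by rw [hxx]

-- the cut-point characterisation shared by both phase-1 matchers
def pvCut (cs : List Char) (i : Nat) : Prop :=
  i ≤ cs.length ∧ (i = cs.length ∨ cs[i]? = some ' ' ∨ cs[i]? = some ',') ∧
    pvCasualPatterns.contains (cs.take i) = true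

lemma pvMember_nil (t : PvTST) : pvMember t [] = false := by
  cases t <;> simp [pvMember]

lemma pvWalk_iff (t : PvTST) (cs : List Char) :
    pvWalk t cs = true ↔ ∃ i, i ≤ cs.length ∧
      (i = cs.length ∨ cs[i]? = some ' ' ∨ cs[i]? = some ',') ∧
      pvMember t (cs.take i) = true := by
  induction t generalizing cs with
  | nil => simp [pvWalk, pvMember]
  | node c term lt eq gt ihlt iheq ihgt =>
    cases cs with
    | nil =>
      simp only [pvWalk, List.length_nil, Nat.le_zero]
      constructor
      · intro h; cases h
      · rintro ⟨i, rfl, -, hmem⟩; simp [pvMember] at hmem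
    | cons x rest =>
      rcases lt_trichotomy x c with h | h | h
      · have hmem : ∀ i, pvMember (.node c term lt eq gt) ((x :: rest).take i)
            = pvMember lt ((x :: rest).take i) := by
          intro i; cases i <;> simp [pvMember, pvMember_nil, h]
        rw [pvWalk, if_pos h, ihlt]
        simp only [hmem]
      · subst h
        rw [pvWalk, if_neg (lt_irrefl x), if_neg (lt_irrefl x)]
        constructor
        · intro hw
          rcases (Bool.or_eq_true _ _).mp hw with hb | hw
          · simp only [Bool.and_eq_true] at hb
            obtain ⟨hterm, hbdry⟩ := hb
            refine ⟨1, by simp, ?_, ?_⟩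
            · rcases (Bool.or_eq_true _ _).mp hbdry with he | hh
              · left; simp [List.isEmpty_iff.mp he]
              · right
                rcases (Bool.or_eq_true _ _).mp hh with h1 | h1
                · left; simpa [List.getElem?_cons_succ, ← List.head?_eq_getElem?] using
                    (beq_iff_eq.mp h1)
                · right; simpa [List.getElem?_cons_succ, ← List.head?_eq_getElem?] using
                    (beq_iff_eq.mp h1)
            · simp [pvMember, hterm]
          · obtain ⟨j, hj, hcond, hmem⟩ := (iheq rest).mp hw
            have hne : rest.take j ≠ [] := by
              intro hO; rw [hO] at hmem; simp [pvMember_nil] at hmem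
            refine ⟨j + 1, by simpa using hj, ?_, ?_⟩
            · rcases hcond with h1 | h1 | h1
              · left; simp [h1]
              · right; left; simpa using h1
              · right; right; simpa using h1
            · simpa [pvMember, List.take_succ_cons, lt_irrefl, List.isEmpty_iff, hne] using hmem
        · rintro ⟨i, hi, hcond, hmem⟩
          match i with
          | 0 => simp [pvMember] at hmem
          | 1 =>
            have hterm : term = true := by
              simpa [pvMember, List.take_succ_cons, lt_irrefl] using hmem
            apply (Bool.or_eq_true _ _).mpr; left
            rw [Bool.and_eq_true]; refine ⟨hterm, ?_⟩
            rcases hcond with h1 | h1 | h1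
            · have hr0 : rest = [] := by
                have hl0 : rest.length = 0 := by rw [List.length_cons] at h1; omega
                exact List.length_eq_zero_iff.mp hl0
              simp [hr0]
            · apply (Bool.or_eq_true _ _).mpr; right
              apply (Bool.or_eq_true _ _).mpr; left
              simp only [List.getElem?_cons_succ, ← List.head?_eq_getElem?] at h1
              simp [h1]
            · apply (Bool.or_eq_true _ _).mpr; right
              apply (Bool.or_eq_true _ _).mpr; right
              simp only [List.getElem?_cons_succ, ← List.head?_eq_getElem?] at h1
              simp [h1]
          | (j + 2) =>
            have hrlen : j + 1 ≤ rest.length := by simpa using hi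
            have hne : rest.take (j + 1) ≠ [] := by
              have hr : rest ≠ [] := by
                intro h0; rw [h0] at hrlen; simp at hrlen
              simp [List.take_eq_nil_iff, hr]
            have hmem' : pvMember eq (rest.take (j + 1)) = true := by
              simpa [pvMember, List.take_succ_cons, lt_irrefl, List.isEmpty_iff, hne] using hmem
            apply (Bool.or_eq_true _ _).mpr; right
            refine (iheq rest).mpr ⟨j + 1, hrlen, ?_, hmem'⟩
            rcases hcond with h1 | h1 | h1
            · left; simpa using h1
            · right; left; simpa using h1
            · right; right; simpa using h1
      · have hmem : ∀ i, pvMember (.node c term lt eq gt) ((x :: rest).take i)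
            = pvMember gt ((x :: rest).take i) := by
          intro i; cases i <;> simp [pvMember, pvMember_nil, h, lt_asymm h]
        rw [pvWalk, if_neg (lt_asymm h), if_pos h, ihgt]
        simp only [hmem]

lemma pvA_phase1_iff (qc : List Char) :
    (pvCasualPatterns.any (fun p =>
        qc == p || PySem.Chars.startswith qc (p ++ [' ']) || PySem.Chars.startswith qc (p ++ [','])))
      = true ↔ ∃ i, pvCut qc i := by
  simp only [List.any_eq_true, Bool.or_eq_true, beq_iff_eq, PySem.Chars.startswith_iff, pvCut,
    List.contains_iff_mem]
  constructor
  · rintro ⟨p, hp, hm⟩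
    rcases hm with ((rfl | h) | h)
    · exact ⟨qc.length, le_refl _, Or.inl rfl, by rw [List.take_length]; exact hp⟩
    · have hpre : p <+: qc := (List.prefix_append p [' ']).trans h
      have hlt : p.length + 1 ≤ qc.length := by
        have := h.length_le; simp at this; omega
      refine ⟨p.length, by omega, Or.inr (Or.inl ?_), ?_⟩
      · obtain ⟨t, rfl⟩ := h
        rw [List.getElem?_append_left (by simp), List.getElem?_append_right (by simp)]
        simp
      · rw [← List.prefix_iff_eq_take.mp hpre]; exact hp
    · have hpre : p <+: qc := (List.prefix_append p [',']).trans h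
      have hlt : p.length + 1 ≤ qc.length := by
        have := h.length_le; simp at this; omega
      refine ⟨p.length, by omega, Or.inr (Or.inr ?_), ?_⟩
      · obtain ⟨t, rfl⟩ := h
        rw [List.getElem?_append_left (by simp), List.getElem?_append_right (by simp)]
        simp
      · rw [← List.prefix_iff_eq_take.mp hpre]; exact hp
  · rintro ⟨i, hle, hcut, hmem⟩
    refine ⟨qc.take i, hmem, ?_⟩
    rcases hcut with rfl | ⟨hc⟩ | ⟨hc⟩
    · exact Or.inl (Or.inl (by rw [List.take_length]))
    · have hstep : qc.take i ++ [' '] = qc.take (i + 1) := by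
        rw [List.take_succ, hc]; rfl
      exact Or.inl (Or.inr (hstep ▸ List.take_prefix (i + 1) qc))
    · have hstep : qc.take i ++ [','] = qc.take (i + 1) := by
        rw [List.take_succ, hc]; rfl
      exact Or.inr (hstep ▸ List.take_prefix (i + 1) qc)

lemma pvPhase1_eq (qc : List Char) :
    (pvCasualPatterns.any (fun p =>
        qc == p || PySem.Chars.startswith qc (p ++ [' ']) || PySem.Chars.startswith qc (p ++ [','])))
      = pvWalk pvTrie qc := by
  rw [Bool.eq_iff_iff, pvA_phase1_iff, pvWalk_iff]
  constructor
  · rintro ⟨i, hle, hcut, hmem⟩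
    refine ⟨i, hle, hcut, ?_⟩
    rw [pvTrie, pvMember_foldl _ pvPatternsB_ne_nil, pvPatternsB_eq, hmem]
    simp
  · rintro ⟨i, hle, hcut, hmem⟩
    refine ⟨i, hle, hcut, ?_⟩
    rw [pvTrie, pvMember_foldl _ pvPatternsB_ne_nil, pvPatternsB_eq] at hmem
    simpa [pvMember] using hmem

-- ===== VERDICT (by name: the statement is the Claim_ definition above) =====
theorem is_casual_message_py_spec : Claim_equal_is_casual_message_py := by
  intro query _
  unfold Spec_is_casual_message_py
  simp only [is_casual_message_py, is_casual_message_py_alt]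
  rw [pvChopPunct_eq, pvPhase1_eq, pvIndicatorsB_eq]
  split
  · rfl
  · split
    · cases pvKnowledgeIndicators.any
        (fun ind => PySem.Chars.isIn ind (PySem.Chars.strip (PySem.Chars.lower query.toList))) <;>
        simp
    · rfl
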